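-- pv_equiv track=rewrite | github.com/htphuc1994/po-wcvar-nsgaiii | plan_cvar.py | non_zero_indices
-- ===== SOURCE A (Python) =====
-- def non_zero_indices(array):
--     count = 0
--     for element in array:
--         if element != 0:
--             count += 1
--
--     non_zero_indices = [0] * count
--     index = 0
--     for i in range(len(array)):
--         if array[i] != 0:
--             non_zero_indices[index] = i
--             index += 1
--
--     return non_zero_indices
-- ===== SOURCE B (Python) =====
-- def non_zero_indices(array):
--     return [i for i, x in enumerate(array) if x != 0]
-- ===== Notes on version B (the rewrite author's own statement) =====
-- stated objective: simpler
-- what changed: Replaces A's two passes (count non-zeros, preallocate a zero list, then fill by a separate write index) with one comprehension over enumerate that emits each index directly.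
import Mathlib
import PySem

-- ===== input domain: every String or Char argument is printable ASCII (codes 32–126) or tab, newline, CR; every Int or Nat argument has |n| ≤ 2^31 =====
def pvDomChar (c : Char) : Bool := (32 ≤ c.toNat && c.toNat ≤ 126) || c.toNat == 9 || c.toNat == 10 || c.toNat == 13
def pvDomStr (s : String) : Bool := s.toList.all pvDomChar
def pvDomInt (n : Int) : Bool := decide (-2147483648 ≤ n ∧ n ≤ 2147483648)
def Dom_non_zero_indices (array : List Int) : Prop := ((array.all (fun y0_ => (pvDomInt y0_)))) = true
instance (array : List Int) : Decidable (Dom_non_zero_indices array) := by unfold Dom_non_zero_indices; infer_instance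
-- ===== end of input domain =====

-- B replaces A's two passes (count, preallocate, fill by write index) with one direct pass; return value only, no mutation either way.

-- ===== PORT A =====
-- first loop: count the non-zero elements
-- second loop: fill the preallocated list at a running write index
def non_zero_indices (array : List Int) : List Int :=
  (array.zipIdx.foldl
    (fun (s : List Int × Nat) (p : Int × Nat) =>
      if p.1 ≠ 0 then (s.1.set s.2 (p.2 : Int), s.2 + 1) else s)
    (List.replicate (array.foldl (fun c element => if element ≠ 0 then c + 1 else c) (0 : Int)).toNat 0, 0)).1

-- ===== PORT B =====
-- [i for i, x in enumerate(array) if x != 0]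
def non_zero_indices_alt (array : List Int) : List Int :=
  array.zipIdx.filterMap (fun p => if p.1 ≠ 0 then some ((p.2 : Int)) else none)

-- ===== PRECONDITION & SPEC =====
def Spec_non_zero_indices (array : List Int) (out : List Int) : Prop := out = non_zero_indices_alt array
instance (array : List Int) (out : List Int) : Decidable (Spec_non_zero_indices array out) := by unfold Spec_non_zero_indices; infer_instance

-- ===== CLAIM (what is proved, stated in full; the proofs are below) =====
def Claim_equal_non_zero_indices : Prop := ∀ (array : List Int), Dom_non_zero_indices array → Spec_non_zero_indices array (non_zero_indices array)

-- ===== LEMMAS AND PROOFS =====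

-- A's counting loop computes the countP of the non-zero test.
theorem count_loop_eq (l : List Int) (c : Int) :
    l.foldl (fun c element => if element ≠ 0 then c + 1 else c) c
      = c + (l.countP (fun e => e != 0) : Int) := by
  induction l generalizing c with
  | nil => simp
  | cons h t ih =>
    simp only [List.foldl_cons, List.countP_cons]
    by_cases hz : h ≠ 0
    · rw [if_pos hz, ih]
      simp [hz]
      push_cast
      ring
    · rw [if_neg hz, ih]
      simp only [ne_eq, not_not] at hz
      simp [hz]

theorem countP_zipIdx (l : List Int) (n : Nat) :
    (l.zipIdx n).countP (fun p => p.1 != 0) = l.countP (fun e => e != 0) := by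
  induction l generalizing n with
  | nil => simp
  | cons h t ih => simp [List.zipIdx_cons, List.countP_cons, ih]

theorem set_append_cons {α : Type} (acc : List α) (y : α) (r : List α) (v : α) :
    (acc ++ y :: r).set acc.length v = acc ++ v :: r := by
  induction acc with
  | nil => simp
  | cons a t ih => simp [List.set, ih]

-- Loop invariant for A's fill loop.
theorem fill_inv (l : List (Int × Nat)) (acc : List Int) :
    l.foldl
      (fun (s : List Int × Nat) (p : Int × Nat) =>
        if p.1 ≠ 0 then (s.1.set s.2 (p.2 : Int), s.2 + 1) else s)
      (acc ++ List.replicate (l.countP (fun p => p.1 != 0)) 0, acc.length)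
      = (acc ++ l.filterMap (fun p => if p.1 ≠ 0 then some ((p.2 : Int)) else none),
         acc.length + l.countP (fun p => p.1 != 0)) := by
  induction l generalizing acc with
  | nil => simp
  | cons p t ih =>
    by_cases hz : p.1 ≠ 0
    · have h1 : (p :: t).countP (fun p => p.1 != 0) = t.countP (fun p => p.1 != 0) + 1 := by
        simp [List.countP_cons, hz]
      have h2 := ih (acc ++ [(p.2 : Int)])
      simp only [h1, List.replicate_succ, List.foldl_cons, if_pos hz,
        set_append_cons acc 0 (List.replicate (t.countP (fun p => p.1 != 0)) 0) (p.2 : Int)]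
      have hacc : acc ++ (p.2 : Int) :: List.replicate (t.countP (fun p => p.1 != 0)) 0
          = (acc ++ [(p.2 : Int)]) ++ List.replicate (t.countP (fun p => p.1 != 0)) 0 := by
        simp
      rw [hacc]
      have hlen : acc.length + 1 = (acc ++ [(p.2 : Int)]).length := by simp
      rw [hlen, h2]
      simp [hz]
      omega
    · simp only [ne_eq, not_not] at hz
      simp only [List.foldl_cons, List.countP_cons, List.filterMap_cons, hz]
      simpa using ih acc

-- ===== VERDICT (by name: the statement is the Claim_ definition above) =====
theorem non_zero_indices_spec : Claim_equal_non_zero_indices := by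
  intro array _
  unfold Spec_non_zero_indices non_zero_indices non_zero_indices_alt
  have hc : (array.foldl (fun c element => if element ≠ 0 then c + 1 else c) (0:Int)).toNat
      = array.zipIdx.countP (fun p => p.1 != 0) := by
    rw [count_loop_eq, countP_zipIdx]
    simp
  have := fill_inv array.zipIdx []
  simp only [List.length_nil] at this
  rw [hc]
  simp only [List.nil_append] at this
  rw [this]
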